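-- pv_equiv track=rewrite | github.com/tugberko/tarfin_case | feature_engineering/longest_streak.py | len_longest_nonpositive_subseq
-- ===== SOURCE A (Python) =====
-- def len_longest_nonpositive_subseq(lst):
--     subsequences = []
--     start_index = None
--
--     for i, num in enumerate(lst):
--         if num <= 0:
--             if start_index is None:
--                 start_index = i
--         elif start_index is not None:
--             end_index = i - 1
--             subsequence = lst[start_index:end_index + 1]
--             subsequences.append(subsequence)
--             start_index = None
--
--     if start_index is not None:
--         subsequence = lst[start_index:]
--         subsequences.append(subsequence)
--
--     maxlen = 0
--
--     for current_seq in subsequences: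
--         if len(current_seq) >= maxlen:
--             maxlen = len(current_seq)
--
--     return maxlen
-- ===== SOURCE B (Python) =====
-- def len_longest_nonpositive_subseq(lst):
--     best = 0
--     cur = 0
--     for num in lst:
--         if num <= 0:
--             cur += 1
--             if cur > best:
--                 best = cur
--         else:
--             cur = 0
--     return best
-- ===== Notes on version B (the rewrite author's own statement) =====
-- stated objective: simpler
-- what changed: Replaces the two-phase algorithm (materialize every non-positive run as a sliced sublist, then a second pass taking the max length) with a single fused pass that keeps only two integers, current run length and best so far; no sublists are built.
import Mathlib
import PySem

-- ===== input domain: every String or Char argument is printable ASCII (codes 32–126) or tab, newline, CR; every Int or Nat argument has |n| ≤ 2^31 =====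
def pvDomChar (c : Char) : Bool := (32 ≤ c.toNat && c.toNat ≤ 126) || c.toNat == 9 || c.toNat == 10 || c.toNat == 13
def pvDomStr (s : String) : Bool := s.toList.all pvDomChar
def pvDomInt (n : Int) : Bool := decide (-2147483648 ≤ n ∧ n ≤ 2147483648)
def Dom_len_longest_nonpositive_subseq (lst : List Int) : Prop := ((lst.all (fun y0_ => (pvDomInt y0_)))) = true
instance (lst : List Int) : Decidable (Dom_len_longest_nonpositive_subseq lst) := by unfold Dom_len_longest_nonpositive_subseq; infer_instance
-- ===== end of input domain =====

-- B replaces A's two-phase algorithm (collect each non-positive run as a sliced sublist, then scan for the max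
-- length) with one fused pass maintaining two integers (current run length, best so far); objective: simpler.


-- ===== PORT A =====
-- loop body of A's first for-loop: state = (subsequences, start_index)
def pvAStep (lst : List Int) (st : List (List Int) × Option Int) (p : Int × Int) :
    List (List Int) × Option Int :=
  match p with
  | (i, num) =>
    if num ≤ 0 then
      match st.2 with
      | none => (st.1, some i)
      | some _ => st
    else
      match st.2 with
      | some startIndex =>
        let endIndex := i - 1
        (st.1 ++ [PySem.List.slice lst (some startIndex) (some (endIndex + 1))], none)
      | none => st

def len_longest_nonpositive_subseq (lst : List Int) : Int :=
  let st := (PySem.List.enumerate lst 0).foldl (pvAStep lst) ([], none)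
  let subsequences :=
    match st.2 with
    | some startIndex => st.1 ++ [PySem.List.slice lst (some startIndex)]
    | none => st.1
  subsequences.foldl
    (fun maxlen currentSeq =>
      if (currentSeq.length : Int) ≥ maxlen then (currentSeq.length : Int) else maxlen) 0

-- ===== PORT B =====
-- state = (best, cur)
def pvBStep (st : Int × Int) (num : Int) : Int × Int :=
  if num ≤ 0 then
    let cur := st.2 + 1
    (if cur > st.1 then cur else st.1, cur)
  else
    (st.1, 0)

def len_longest_nonpositive_subseq_alt (lst : List Int) : Int :=
  (lst.foldl pvBStep (0, 0)).1

-- ===== PRECONDITION & SPEC =====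
def Spec_len_longest_nonpositive_subseq (lst : List Int) (out : Int) : Prop := out = len_longest_nonpositive_subseq_alt lst
instance (lst : List Int) (out : Int) : Decidable (Spec_len_longest_nonpositive_subseq lst out) := by unfold Spec_len_longest_nonpositive_subseq; infer_instance

-- ===== CLAIM (what is proved, stated in full; the proofs are below) =====
def Claim_equal_len_longest_nonpositive_subseq : Prop := ∀ (lst : List Int), Dom_len_longest_nonpositive_subseq lst → Spec_len_longest_nonpositive_subseq lst (len_longest_nonpositive_subseq lst)

-- ===== LEMMAS AND PROOFS =====

-- A's second loop, as a function of the collected sublists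
def pvM (subs : List (List Int)) : Int :=
  subs.foldl
    (fun maxlen currentSeq =>
      if (currentSeq.length : Int) ≥ maxlen then (currentSeq.length : Int) else maxlen) 0

lemma pvM_step_mono (a : Int) (subs : List (List Int)) :
    a ≤ subs.foldl
      (fun maxlen currentSeq =>
        if (currentSeq.length : Int) ≥ maxlen then (currentSeq.length : Int) else maxlen) a := by
  induction subs generalizing a with
  | nil => simp
  | cons c cs ih =>
    simp only [List.foldl_cons]
    refine le_trans ?_ (ih _)
    split <;> omega

lemma pvM_nonneg (subs : List (List Int)) : 0 ≤ pvM subs := pvM_step_mono 0 subs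

lemma pvM_append_singleton (subs : List (List Int)) (c : List Int) :
    pvM (subs ++ [c]) = max (pvM subs) (c.length : Int) := by
  simp only [pvM, List.foldl_append, List.foldl_cons, List.foldl_nil]
  split <;> omega

-- main invariant: running A's first loop on the suffix of lst starting at index i, then A's
-- post-processing and max pass, gives B's fold result from the matching (best, cur) state.
lemma pv_main (lst : List Int) : ∀ (rest : List Int) (i sn : Nat) (subs : List (List Int))
    (start : Option Int) (cur best : Int),
    rest = lst.drop i → i ≤ lst.length →
    (start = none → cur = 0) →
    (∀ s, start = some s → s = (sn : Int) ∧ sn ≤ i ∧ cur = (i : Int) - (sn : Int)) →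
    best = max (pvM subs) cur →
    (let st := (PySem.List.enumerate rest (i : Int)).foldl (pvAStep lst) (subs, start)
     let subsequences :=
       match st.2 with
       | some startIndex => st.1 ++ [PySem.List.slice lst (some startIndex)]
       | none => st.1
     pvM subsequences) = (rest.foldl pvBStep (best, cur)).1 := by
  intro rest
  induction rest with
  | nil =>
    intro i sn subs start cur best hdrop hle hnone hsome hbest
    have hi : i = lst.length := by
      have := congrArg List.length hdrop
      simp at this; omega
    simp only [PySem.List.enumerate_nil, List.foldl_nil]
    cases start with
    | none =>
      have h0 := hnone rfl
      have := pvM_nonneg subs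
      simp only []
      omega
    | some s =>
      obtain ⟨hs, hsn, hcur⟩ := hsome s rfl
      subst hs
      simp only []
      rw [PySem.List.slice_from lst (by positivity), pvM_append_singleton]
      have hlen : ((lst.drop (((sn : Int)).toNat)).length : Int) = (lst.length : Int) - sn := by
        simp [Int.toNat_natCast]; omega
      omega
  | cons num rest ih =>
    intro i sn subs start cur best hdrop hle hnone hsome hbest
    have hlt : i < lst.length := by
      have := congrArg List.length hdrop
      simp at this; omega
    have hdrop' : rest = lst.drop (i + 1) := by
      have h := congrArg (List.drop 1) hdrop
      simpa [List.drop_drop, Nat.add_comm] using h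
    rw [PySem.List.enumerate_cons, List.foldl_cons, List.foldl_cons]
    by_cases hnum : num ≤ 0
    · -- non-positive element: run extends (or starts)
      cases start with
      | none =>
        have h0 := hnone rfl
        have hstep : pvAStep lst (subs, none) ((i : Int), num) = (subs, some (i : Int)) := by
          simp [pvAStep, hnum]
        have hbstep : pvBStep (best, cur) num = (max best (cur + 1), cur + 1) := by
          simp only [pvBStep, if_pos hnum]
          have : (if cur + 1 > best then cur + 1 else best) = max best (cur + 1) := by omega
          rw [this]
        subst h0
        rw [hstep, hbstep]
        have hpush : ((i : Int) : Int) + 1 = ((i + 1 : Nat) : Int) := by push_cast; ring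
        rw [hpush]
        refine ih (i + 1) i subs (some (i : Int)) (0 + 1) (max best (0 + 1)) hdrop' (by omega)
          (by intro h; cases h) ?_ ?_
        · intro s hs; cases hs; refine ⟨rfl, by omega, by push_cast; ring⟩
        · have := pvM_nonneg subs; omega
      | some s =>
        obtain ⟨hs, hsn, hcur⟩ := hsome s rfl
        have hstep : pvAStep lst (subs, some s) ((i : Int), num) = (subs, some s) := by
          simp [pvAStep, hnum]
        have hbstep : pvBStep (best, cur) num = (max best (cur + 1), cur + 1) := by
          simp only [pvBStep, if_pos hnum]
          have : (if cur + 1 > best then cur + 1 else best) = max best (cur + 1) := by omega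
          rw [this]
        rw [hstep, hbstep]
        have hpush : ((i : Int) : Int) + 1 = ((i + 1 : Nat) : Int) := by push_cast; ring
        rw [hpush]
        refine ih (i + 1) sn subs (some s) (cur + 1) (max best (cur + 1)) hdrop' (by omega)
          (by intro h; cases h) ?_ ?_
        · intro s' hs'; cases hs'; refine ⟨hs, by omega, by rw [hcur]; push_cast; ring⟩
        · omega
    · -- positive element: run (if any) is closed off
      cases start with
      | none =>
        have h0 := hnone rfl
        have hstep : pvAStep lst (subs, none) ((i : Int), num) = (subs, none) := by
          simp [pvAStep, hnum]
        have hbstep : pvBStep (best, cur) num = (best, 0) := by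
          simp [pvBStep, hnum]
        rw [hstep, hbstep]
        have hpush : ((i : Int) : Int) + 1 = ((i + 1 : Nat) : Int) := by push_cast; ring
        rw [hpush]
        exact ih (i + 1) sn subs none 0 best hdrop' (by omega) (fun _ => rfl)
          (by intro s hs; cases hs) (by omega)
      | some s =>
        obtain ⟨hs, hsn, hcur⟩ := hsome s rfl
        have hstep : pvAStep lst (subs, some s) ((i : Int), num) =
            (subs ++ [PySem.List.slice lst (some s) (some (((i : Int) - 1) + 1))], none) := by
          simp [pvAStep, hnum]
        have hbstep : pvBStep (best, cur) num = (best, 0) := by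
          simp [pvBStep, hnum]
        rw [hstep, hbstep]
        have hpush : ((i : Int) : Int) + 1 = ((i + 1 : Nat) : Int) := by push_cast; ring
        rw [hpush]
        refine ih (i + 1) sn (subs ++ [PySem.List.slice lst (some s) (some (((i : Int) - 1) + 1))])
          none 0 best hdrop' (by omega) (fun _ => rfl) (by intro s' hs'; cases hs') ?_
        have hsimp : ((i : Int) - 1) + 1 = (i : Int) := by ring
        rw [pvM_append_singleton, hsimp, hs, PySem.List.length_slice,
          PySem.List.clampIdx_natCast, PySem.List.clampIdx_natCast]
        have : min i lst.length = i := by omega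
        have h2 : min sn lst.length = sn := by omega
        rw [this, h2]
        have hc : ((i - sn : Nat) : Int) = (i : Int) - (sn : Int) := by omega
        rw [hc]
        omega

-- ===== VERDICT (by name: the statement is the Claim_ definition above) =====
theorem len_longest_nonpositive_subseq_spec : Claim_equal_len_longest_nonpositive_subseq := by
  intro lst _
  unfold Spec_len_longest_nonpositive_subseq len_longest_nonpositive_subseq len_longest_nonpositive_subseq_alt
  have := pv_main lst lst 0 0 [] none 0 0 (by simp) (by omega) (fun _ => rfl)
    (by intro s hs; cases hs) (by simp [pvM])
  simpa [pvM] using this
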